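-- pv_equiv track=rewrite | github.com/JoanaDirce/AMD-Risk-VIA | via/engine.py | generate_graph_weights
-- ===== SOURCE A (Python) =====
-- def generate_graph_weights(nV):
--     """Generates the factor graph structure for the weighted VIA model."""
--     N = nV
--     t = {i: [] for i in range(1, N + 1)}
--     q = {i: 0 for i in range(1, N + 1)}
--     vf = {i: [] for i in range(1, N + 1)}
--
--     # Initialize fv keys
--     # Note: Logic preserved from original, ensuring keys cover range
--     fv = {f: [] for f in range(1, (nV - 1) * 2 + 2)}
--
--     # Feature layer
--     for i in range(1, (nV - 1) + 1):
--         t[i] += [nV]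
--         fv[i] += [i]
--         fv[(nV - 1) + i] += [i, nV]
--         vf[i] += [i, (nV - 1) + i]
--
--     # Target Node (e.g., AMD)
--     t[nV] += list(range(1, (nV - 1) + 1))
--     fv[(nV - 1) * 2 + 1] += [nV]
--     vf[nV] += list(range(nV, (nV - 1) * 2 + 1)) + [(nV - 1) * 2 + 1]
--
--     for i in range(1, N + 1):
--         q[i] = len(t[i])
--
--     Nf = len(fv.keys())
--     return N, Nf, t, q, vf, fv
-- ===== SOURCE B (Python) =====
-- def generate_graph_weights(nV):
--     """Generates the factor graph structure for the weighted VIA model.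
--
--     Builds a canonical (variable, factor) edge list for the star structure,
--     groups it into vf/fv in one pass, and derives t as each variable's
--     neighbours through shared factors.
--     """
--     m = nV - 1
--     edges = []
--     for i in range(1, m + 1):
--         edges.append((i, i))          # unary feature factor
--         edges.append((i, m + i))      # pairwise factor, feature side
--         edges.append((nV, m + i))     # pairwise factor, target side
--     edges.append((nV, 2 * m + 1))     # target prior factor
--     vf = {v: [] for v in range(1, nV + 1)}
--     fv = {f: [] for f in range(1, 2 * m + 2)}
--     for (v, g) in edges:
--         vf[v].append(g)
--         fv[g].append(v)
--     t = {v: [u for g in vf[v] for u in fv[g] if u != v] for v in range(1, nV + 1)}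
--     q = {v: len(t[v]) for v in range(1, nV + 1)}
--     return nV, 2 * m + 1, t, q, vf, fv
-- ===== Notes on version B (the rewrite author's own statement) =====
-- stated objective: alternative
-- what changed: B builds one canonical (variable,factor) edge list for the star graph, groups it into fv/vf in a single generic pass, and derives t as neighbours through shared factors, instead of A's two-phase in-place writes of all four dicts with a special-cased target block.
-- outside the precondition, e.g. on generate_graph_weights(0): A raises KeyError, B raises KeyError
import Mathlib
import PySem

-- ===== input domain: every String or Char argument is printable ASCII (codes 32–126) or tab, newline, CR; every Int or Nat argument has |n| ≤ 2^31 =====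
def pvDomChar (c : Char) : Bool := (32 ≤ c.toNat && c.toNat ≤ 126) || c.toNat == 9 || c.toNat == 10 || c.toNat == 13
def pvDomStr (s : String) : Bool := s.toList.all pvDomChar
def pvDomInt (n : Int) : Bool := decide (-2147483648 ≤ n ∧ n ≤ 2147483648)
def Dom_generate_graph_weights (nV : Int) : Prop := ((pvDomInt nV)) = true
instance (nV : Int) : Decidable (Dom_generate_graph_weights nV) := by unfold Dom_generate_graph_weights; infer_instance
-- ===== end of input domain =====

-- B derives the graph from one canonical (variable,factor) edge list by grouping, instead of
-- A's two-phase in-place mutation of pre-seeded dicts; objective: alternative decomposition.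


-- ===== PORT A =====
-- 'd[k] += xs' is ported as Dict.modify k [] (· ++ xs); exact for every input in Pre_ (nV ≥ 1),
-- where each touched key already exists; on nV ≤ 0 the Python raises KeyError (outside Pre_).
def generate_graph_weights (nV : Int) : Int × Int × (List (Int × List Int)) × (List (Int × Int)) × (List (Int × List Int)) × (List (Int × List Int)) :=
  let N := nV
  let t : PySem.Dict Int (List Int) :=
    PySem.Dict.ofList ((PySem.List.pyRange 1 (N+1) 1).map (fun i => (i, ([] : List Int))))
  let q : PySem.Dict Int Int :=
    PySem.Dict.ofList ((PySem.List.pyRange 1 (N+1) 1).map (fun i => (i, (0 : Int))))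
  let vf : PySem.Dict Int (List Int) :=
    PySem.Dict.ofList ((PySem.List.pyRange 1 (N+1) 1).map (fun i => (i, ([] : List Int))))
  let fv : PySem.Dict Int (List Int) :=
    PySem.Dict.ofList ((PySem.List.pyRange 1 ((nV-1)*2+2) 1).map (fun f => (f, ([] : List Int))))
  let s := (PySem.List.pyRange 1 ((nV-1)+1) 1).foldl
    (fun (s : PySem.Dict Int (List Int) × PySem.Dict Int (List Int) × PySem.Dict Int (List Int)) i =>
      (s.1.modify i [] (· ++ [nV]),
       (s.2.1.modify i [] (· ++ [i])).modify ((nV-1)+i) [] (· ++ [i, nV]),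
       s.2.2.modify i [] (· ++ [i, (nV-1)+i])))
    (t, fv, vf)
  let t := s.1
  let fv := s.2.1
  let vf := s.2.2
  let t := t.modify nV [] (· ++ PySem.List.pyRange 1 ((nV-1)+1) 1)
  let fv := fv.modify ((nV-1)*2+1) [] (· ++ [nV])
  let vf := vf.modify nV [] (· ++ (PySem.List.pyRange nV ((nV-1)*2+1) 1 ++ [(nV-1)*2+1]))
  let q := (PySem.List.pyRange 1 (N+1) 1).foldl (fun d i => d.insert i ((t.getD i []).length : Int)) q
  let Nf : Int := (fv.keys.length : Int)
  (N, Nf, t.items, q.items, vf.items, fv.items)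

def generate_graph_weights_alt (nV : Int) : Int × Int × (List (Int × List Int)) × (List (Int × Int)) × (List (Int × List Int)) × (List (Int × List Int)) :=
  let m := nV - 1
  let edges : List (Int × Int) :=
    ((PySem.List.pyRange 1 (m+1) 1).foldl (fun es i => es ++ [(i, i), (i, m+i), (nV, m+i)]) []) ++ [(nV, 2*m+1)]
  let vf0 : PySem.Dict Int (List Int) :=
    PySem.Dict.ofList ((PySem.List.pyRange 1 (nV+1) 1).map (fun v => (v, ([] : List Int))))
  let fv0 : PySem.Dict Int (List Int) :=
    PySem.Dict.ofList ((PySem.List.pyRange 1 (2*m+2) 1).map (fun f => (f, ([] : List Int))))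
  -- 'vf[v].append(g)' / 'fv[g].append(v)' is Dict.modify k [] (· ++ [x]); exact for nV ≥ 1, where every key exists
  let s := edges.foldl
    (fun (s : PySem.Dict Int (List Int) × PySem.Dict Int (List Int)) p =>
      (s.1.modify p.1 [] (· ++ [p.2]), s.2.modify p.2 [] (· ++ [p.1]))) (vf0, fv0)
  let vf := s.1
  let fv := s.2
  let t : PySem.Dict Int (List Int) :=
    PySem.Dict.ofList ((PySem.List.pyRange 1 (nV+1) 1).map
      (fun v => (v, (vf.getD v []).flatMap (fun g => (fv.getD g []).filter (fun u => u != v)))))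
  let q : PySem.Dict Int Int :=
    PySem.Dict.ofList ((PySem.List.pyRange 1 (nV+1) 1).map
      (fun v => (v, ((t.getD v []).length : Int))))
  (nV, 2*m+1, t.items, q.items, vf.items, fv.items)

-- ===== PRECONDITION & SPEC =====
-- Pre_ excludes exactly nV ≤ 0, where the Python A raises KeyError at 't[nV] += ...'.
def Pre_generate_graph_weights (nV : Int) : Prop := 1 ≤ nV
instance (nV : Int) : Decidable (Pre_generate_graph_weights nV) := by unfold Pre_generate_graph_weights; infer_instance
def pvWitness_generate_graph_weights : Int := 3

def Spec_generate_graph_weights (nV : Int) (out : Int × Int × (List (Int × List Int)) × (List (Int × Int)) × (List (Int × List Int)) × (List (Int × List Int))) : Prop := out = generate_graph_weights_alt nV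
instance (nV : Int) (out : Int × Int × (List (Int × List Int)) × (List (Int × Int)) × (List (Int × List Int)) × (List (Int × List Int))) : Decidable (Spec_generate_graph_weights nV out) := by
  unfold Spec_generate_graph_weights
  letI : DecidableEq (List (Int × List Int) × List (Int × List Int)) := instDecidableEqProd
  letI : DecidableEq (List (Int × Int) × List (Int × List Int) × List (Int × List Int)) := instDecidableEqProd
  letI : DecidableEq (List (Int × List Int) × List (Int × Int) × List (Int × List Int) × List (Int × List Int)) := instDecidableEqProd
  letI : DecidableEq (Int × List (Int × List Int) × List (Int × Int) × List (Int × List Int) × List (Int × List Int)) := instDecidableEqProd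
  letI : DecidableEq (Int × Int × List (Int × List Int) × List (Int × Int) × List (Int × List Int) × List (Int × List Int)) := instDecidableEqProd
  infer_instance

-- ===== CLAIM (what is proved, stated in full; the proofs are below) =====
def Claim_equal_generate_graph_weights : Prop := ∀ (nV : Int), Dom_generate_graph_weights nV → Pre_generate_graph_weights nV → Spec_generate_graph_weights nV (generate_graph_weights nV)

-- ===== LEMMAS AND PROOFS =====
lemma pv_items_ofList {ν : Type} (ps : List (Int × ν)) (h : (ps.map Prod.fst).Nodup) :
    (PySem.Dict.ofList ps).items = ps := by
  have := PySem.Dict.items_foldl_insert_fresh ps Prod.fst Prod.snd PySem.Dict.empty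
    (fun a _ => PySem.Dict.contains_empty _) h
  simpa [PySem.Dict.ofList, PySem.Dict.update] using this

lemma pv_keys_ofList_map {ν : Type} (l : List Int) (f : Int → ν) (hl : l.Nodup) :
    (PySem.Dict.ofList (l.map (fun i => (i, f i)))).keys = l := by
  have h : ((l.map (fun i => (i, f i))).map Prod.fst).Nodup := by
    simpa [List.map_map, Function.comp_def] using hl
  simp [PySem.Dict.keys, pv_items_ofList _ h, List.map_map, Function.comp_def]

lemma pv_getD_ofList_map {ν : Type} (l : List Int) (f : Int → ν) (hl : l.Nodup)
    (k : Int) (hk : k ∈ l) (dflt : ν) :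
    (PySem.Dict.ofList (l.map (fun i => (i, f i)))).getD k dflt = f k := by
  have h : ((l.map (fun i => (i, f i))).map Prod.fst).Nodup := by
    simpa [List.map_map, Function.comp_def] using hl
  refine PySem.Dict.getD_of_mem_items _ ?_ (PySem.Dict.nodup_keys_ofList _) dflt
  rw [pv_items_ofList _ h]
  exact List.mem_map_of_mem hk

-- t-loop: getD after folding 'modify i [] (· ++ [n])' over range(1, 1+j)
lemma pvA_t_getD (n : Int) (j : Nat) (d : PySem.Dict Int (List Int)) :
    ∀ k : Int, ((PySem.List.pyRange 1 (1+(j:Int)) 1).foldl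
        (fun d i => d.modify i [] (· ++ [n])) d).getD k []
      = d.getD k [] ++ (if 1 ≤ k ∧ k < 1+(j:Int) then [n] else []) := by
  induction j with
  | zero =>
    intro k
    rw [if_neg (by omega)]
    simp
  | succ j ih =>
    intro k
    have hc : (1:Int)+((j:Nat)+1:Nat) = (1+(j:Int))+1 := by push_cast; ring
    rw [hc, PySem.List.pyRange_one_succ_right (by omega : (1:Int) ≤ 1+(j:Int)),
        List.foldl_append, List.foldl_cons, List.foldl_nil, PySem.Dict.getD_modify]
    by_cases hk : k = 1+(j:Int)
    · rw [if_pos hk, ih, hk, if_neg (by omega), if_pos (by omega)]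
      simp
    · rw [if_neg hk, ih]
      by_cases h1 : 1 ≤ k ∧ k < 1+(j:Int)
      · rw [if_pos h1, if_pos (by omega)]
      · rw [if_neg h1, if_neg (by omega)]

-- fv-loop: two modifies per i
lemma pvA_fv_getD (nV : Int) (j : Nat) (d : PySem.Dict Int (List Int)) :
    (j:Int) ≤ nV - 1 → ∀ k : Int, ((PySem.List.pyRange 1 (1+(j:Int)) 1).foldl
        (fun d i => (d.modify i [] (· ++ [i])).modify ((nV-1)+i) [] (· ++ [i, nV])) d).getD k []
      = d.getD k [] ++ (if 1 ≤ k ∧ k < 1+(j:Int) then [k] else [])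
          ++ (if nV ≤ k ∧ k < nV+(j:Int) then [k-(nV-1), nV] else []) := by
  induction j with
  | zero =>
    intro _ k
    rw [if_neg (by omega), if_neg (by omega)]
    simp
  | succ j ih =>
    intro hj k
    have hj' : (j:Int) ≤ nV - 1 := by push_cast at hj ⊢; omega
    push_cast
    rw [show (1:Int)+((j:Int)+1) = (1+(j:Int))+1 from by ring,
        PySem.List.pyRange_one_succ_right (by omega : (1:Int) ≤ 1+(j:Int)),
        List.foldl_append, List.foldl_cons, List.foldl_nil,
        PySem.Dict.getD_modify]
    simp only [PySem.Dict.getD_modify, ih hj']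
    clear ih
    split_ifs <;> (try rfl) <;> (try omega) <;> (simp_all; try omega)

-- vf-loop
lemma pvA_vf_getD (nV : Int) (j : Nat) (d : PySem.Dict Int (List Int)) :
    ∀ k : Int, ((PySem.List.pyRange 1 (1+(j:Int)) 1).foldl
        (fun d i => d.modify i [] (· ++ [i, (nV-1)+i])) d).getD k []
      = d.getD k [] ++ (if 1 ≤ k ∧ k < 1+(j:Int) then [k, (nV-1)+k] else []) := by
  induction j with
  | zero =>
    intro k
    rw [if_neg (by omega)]
    simp
  | succ j ih =>
    intro k
    have hc : (1:Int)+((j:Nat)+1:Nat) = (1+(j:Int))+1 := by push_cast; ring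
    rw [hc, PySem.List.pyRange_one_succ_right (by omega : (1:Int) ≤ 1+(j:Int)),
        List.foldl_append, List.foldl_cons, List.foldl_nil, PySem.Dict.getD_modify]
    by_cases hk : k = 1+(j:Int)
    · rw [if_pos hk, ih, hk, if_neg (by omega), if_pos (by omega)]
      simp
    · rw [if_neg hk, ih]
      by_cases h1 : 1 ≤ k ∧ k < 1+(j:Int)
      · rw [if_pos h1, if_pos (by omega)]
      · rw [if_neg h1, if_neg (by omega)]

-- q-loop: inserts with a value depending only on the key
lemma pvA_q_getD (F : Int → Int) (j : Nat) (d : PySem.Dict Int Int) :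
    ∀ k : Int, ((PySem.List.pyRange 1 (1+(j:Int)) 1).foldl
        (fun d i => d.insert i (F i)) d).getD k 0
      = if 1 ≤ k ∧ k < 1+(j:Int) then F k else d.getD k 0 := by
  induction j with
  | zero =>
    intro k
    rw [if_neg (by omega)]
    simp
  | succ j ih =>
    intro k
    have hc : (1:Int)+((j:Nat)+1:Nat) = (1+(j:Int))+1 := by push_cast; ring
    rw [hc, PySem.List.pyRange_one_succ_right (by omega : (1:Int) ≤ 1+(j:Int)),
        List.foldl_append, List.foldl_cons, List.foldl_nil, PySem.Dict.getD_insert]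
    by_cases hk : k = 1+(j:Int)
    · rw [if_pos hk, if_pos (by omega), hk]
    · rw [if_neg hk, ih]
      by_cases h1 : 1 ≤ k ∧ k < 1+(j:Int)
      · rw [if_pos h1, if_pos (by omega)]
      · rw [if_neg h1, if_neg (by omega)]

-- keys are preserved by a modify at a key already present
lemma pv_keys_modify_mem {d : PySem.Dict Int (List Int)} {k : Int} (h : k ∈ d.keys)
    (d0 : List Int) (f : List Int → List Int) : (d.modify k d0 f).keys = d.keys := by
  rw [PySem.Dict.keys_modify]
  exact PySem.Dict.keys_insert_of_contains d _ ((PySem.Dict.contains_iff_mem_keys d k).mpr h)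

lemma pv_keys_insert_mem {ν : Type} {d : PySem.Dict Int ν} {k : Int} (h : k ∈ d.keys)
    (v : ν) : (d.insert k v).keys = d.keys :=
  PySem.Dict.keys_insert_of_contains d _ ((PySem.Dict.contains_iff_mem_keys d k).mpr h)

lemma pvA_t_keys (n : Int) (j : Nat) (d : PySem.Dict Int (List Int)) :
    (∀ i : Int, 1 ≤ i → i < 1+(j:Int) → i ∈ d.keys) →
    ((PySem.List.pyRange 1 (1+(j:Int)) 1).foldl
        (fun d i => d.modify i [] (· ++ [n])) d).keys = d.keys := by
  induction j with
  | zero => intro _; simp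
  | succ j ih =>
    intro h
    push_cast
    rw [show (1:Int)+((j:Int)+1) = (1+(j:Int))+1 from by ring,
        PySem.List.pyRange_one_succ_right (by omega : (1:Int) ≤ 1+(j:Int)),
        List.foldl_append, List.foldl_cons, List.foldl_nil]
    have hk := ih (fun i h1 h2 => h i h1 (by push_cast; omega))
    rw [pv_keys_modify_mem (by rw [hk]; exact h _ (by omega) (by push_cast; omega)), hk]

lemma pvA_vf_keys (nV : Int) (j : Nat) (d : PySem.Dict Int (List Int)) :
    (∀ i : Int, 1 ≤ i → i < 1+(j:Int) → i ∈ d.keys) →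
    ((PySem.List.pyRange 1 (1+(j:Int)) 1).foldl
        (fun d i => d.modify i [] (· ++ [i, (nV-1)+i])) d).keys = d.keys := by
  induction j with
  | zero => intro _; simp
  | succ j ih =>
    intro h
    push_cast
    rw [show (1:Int)+((j:Int)+1) = (1+(j:Int))+1 from by ring,
        PySem.List.pyRange_one_succ_right (by omega : (1:Int) ≤ 1+(j:Int)),
        List.foldl_append, List.foldl_cons, List.foldl_nil]
    have hk := ih (fun i h1 h2 => h i h1 (by push_cast; omega))
    rw [pv_keys_modify_mem (by rw [hk]; exact h _ (by omega) (by push_cast; omega)), hk]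

lemma pvA_fv_keys (nV : Int) (j : Nat) (d : PySem.Dict Int (List Int)) :
    (∀ i : Int, 1 ≤ i → i < 1+(j:Int) → i ∈ d.keys ∧ (nV-1)+i ∈ d.keys) →
    ((PySem.List.pyRange 1 (1+(j:Int)) 1).foldl
        (fun d i => (d.modify i [] (· ++ [i])).modify ((nV-1)+i) [] (· ++ [i, nV])) d).keys = d.keys := by
  induction j with
  | zero => intro _; simp
  | succ j ih =>
    intro h
    push_cast
    rw [show (1:Int)+((j:Int)+1) = (1+(j:Int))+1 from by ring,
        PySem.List.pyRange_one_succ_right (by omega : (1:Int) ≤ 1+(j:Int)),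
        List.foldl_append, List.foldl_cons, List.foldl_nil]
    have hk := ih (fun i h1 h2 => h i h1 (by push_cast; omega))
    have hmem := h (1+(j:Int)) (by omega) (by push_cast; omega)
    rw [pv_keys_modify_mem (k := (nV-1)+(1+(j:Int)))
          (by rw [pv_keys_modify_mem (by rw [hk]; exact hmem.1), hk]; exact hmem.2),
        pv_keys_modify_mem (by rw [hk]; exact hmem.1), hk]

lemma pvA_q_keys (F : Int → Int) (j : Nat) (d : PySem.Dict Int Int) :
    (∀ i : Int, 1 ≤ i → i < 1+(j:Int) → i ∈ d.keys) →
    ((PySem.List.pyRange 1 (1+(j:Int)) 1).foldl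
        (fun d i => d.insert i (F i)) d).keys = d.keys := by
  induction j with
  | zero => intro _; simp
  | succ j ih =>
    intro h
    push_cast
    rw [show (1:Int)+((j:Int)+1) = (1+(j:Int))+1 from by ring,
        PySem.List.pyRange_one_succ_right (by omega : (1:Int) ≤ 1+(j:Int)),
        List.foldl_append, List.foldl_cons, List.foldl_nil]
    have hk := ih (fun i h1 h2 => h i h1 (by push_cast; omega))
    rw [pv_keys_insert_mem (by rw [hk]; exact h _ (by omega) (by push_cast; omega)), hk]

-- B: grouping the edge list by factor
lemma pvB_fv_filter (nV : Int) (j : Nat) :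
    (j:Int) ≤ nV - 1 → ∀ f : Int,
    (((PySem.List.pyRange 1 (1+(j:Int)) 1).foldl
        (fun es i => es ++ [(i, i), (i, nV-1+i), (nV, nV-1+i)]) ([] : List (Int × Int))).filter
          (fun p => p.2 == f)).map (fun p => p.1)
      = (if 1 ≤ f ∧ f < 1+(j:Int) then [f] else [])
          ++ (if nV ≤ f ∧ f < nV+(j:Int) then [f-(nV-1), nV] else []) := by
  induction j with
  | zero =>
    intro _ f
    rw [if_neg (by omega), if_neg (by omega)]
    simp
  | succ j ih =>
    intro hj f
    have hj' : (j:Int) ≤ nV - 1 := by push_cast at hj ⊢; omega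
    push_cast
    rw [show (1:Int)+((j:Int)+1) = (1+(j:Int))+1 from by ring,
        PySem.List.pyRange_one_succ_right (by omega : (1:Int) ≤ 1+(j:Int)),
        List.foldl_append, List.foldl_cons, List.foldl_nil, List.filter_append, List.map_append,
        ih hj' f]
    clear ih
    simp only [List.filter_cons, List.filter_nil, beq_iff_eq]
    split_ifs <;> simp_all <;> try omega

-- B: grouping the edge list by variable
lemma pvB_vf_filter (nV : Int) (j : Nat) :
    (j:Int) ≤ nV - 1 → ∀ v : Int,
    (((PySem.List.pyRange 1 (1+(j:Int)) 1).foldl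
        (fun es i => es ++ [(i, i), (i, nV-1+i), (nV, nV-1+i)]) ([] : List (Int × Int))).filter
          (fun p => p.1 == v)).map (fun p => p.2)
      = (if 1 ≤ v ∧ v < 1+(j:Int) then [v, nV-1+v] else [])
          ++ (if v = nV then PySem.List.pyRange nV (nV+(j:Int)) 1 else []) := by
  induction j with
  | zero =>
    intro _ v
    rw [if_neg (by omega)]
    simp
  | succ j ih =>
    intro hj v
    have hj' : (j:Int) ≤ nV - 1 := by push_cast at hj ⊢; omega
    push_cast
    rw [show (1:Int)+((j:Int)+1) = (1+(j:Int))+1 from by ring,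
        show nV+((j:Int)+1) = (nV+(j:Int))+1 from by ring,
        PySem.List.pyRange_one_succ_right (by omega : (1:Int) ≤ 1+(j:Int)),
        List.foldl_append, List.foldl_cons, List.foldl_nil, List.filter_append, List.map_append,
        ih hj' v]
    clear ih
    by_cases h2 : v = nV
    · rw [PySem.List.pyRange_one_succ_right (by omega : nV ≤ nV+(j:Int))]
      rw [if_neg (by omega), if_pos h2, if_neg (by omega), if_pos h2]
      simp only [List.filter_cons, List.filter_nil, beq_iff_eq]
      rw [if_neg (by omega), if_neg (by omega), if_pos h2.symm]
      simp [show nV-1+(1+(j:Int)) = nV+(j:Int) from by ring]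
    · rw [if_neg h2, if_neg h2]
      simp only [List.filter_cons, List.filter_nil, beq_iff_eq]
      by_cases h1 : v = 1+(j:Int)
      · subst h1
        rw [if_neg (by omega), if_pos rfl, if_pos rfl, if_neg (by omega), if_pos (by omega)]
        simp
      · have e1 : (if 1 ≤ v ∧ v < 1+(j:Int)+1 then [v, nV-1+v] else [])
            = (if 1 ≤ v ∧ v < 1+(j:Int) then [v, nV-1+v] else []) := by
          split_ifs <;> first | rfl | omega
        rw [e1, if_neg (show ¬((1:Int)+(j:Int) = v) from by omega),
            if_neg (show ¬((1:Int)+(j:Int) = v) from by omega),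
            if_neg (show ¬(nV = v) from by omega)]
        simp

lemma pv_items_char {ν : Type} (d : PySem.Dict Int ν) (L : List Int) (f : Int → ν) (dflt : ν)
    (hk : d.keys = L) (hnd : L.Nodup) (hv : ∀ k ∈ L, d.getD k dflt = f k) :
    d.items = L.map (fun k => (k, f k)) := by
  rw [PySem.Dict.items_eq_map_keys d (by rw [hk]; exact hnd) dflt, hk]
  exact List.map_congr_left (fun k hkmem => by rw [hv k hkmem])

lemma pv_getD_of_items {ν : Type} {d : PySem.Dict Int ν} {L : List Int} {f : Int → ν}
    (hi : d.items = L.map (fun k => (k, f k))) (hnd : L.Nodup) {k : Int} (hk : k ∈ L) (dflt : ν) :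
    d.getD k dflt = f k := by
  have h1 : (k, f k) ∈ d.items := by rw [hi]; exact List.mem_map_of_mem hk
  have h2 : d.keys.Nodup := by
    show (d.items.map (·.1)).Nodup
    rw [hi]
    simpa [List.map_map, Function.comp_def] using hnd
  exact PySem.Dict.getD_of_mem_items d h1 h2 dflt

-- closed-form values of the four dictionaries, for keys inside their ranges
def pvTval (nV : Int) (k : Int) : List Int :=
  if k = nV then PySem.List.pyRange 1 (nV-1+1) 1 else [nV]
def pvQval (nV : Int) (k : Int) : Int := (pvTval nV k).length
def pvVfval (nV : Int) (k : Int) : List Int :=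
  if k = nV then PySem.List.pyRange nV ((nV-1)*2+1) 1 ++ [(nV-1)*2+1] else [k, nV-1+k]
def pvFvval (nV : Int) (k : Int) : List Int :=
  if k = (nV-1)*2+1 then [nV] else if k < nV then [k] else [k-(nV-1), nV]

-- ===== A-side items =====
lemma pvA_t_items (nV : Int) (h : 1 ≤ nV) :
    (((PySem.List.pyRange 1 (nV-1+1) 1).foldl (fun d i => d.modify i [] (· ++ [nV]))
        (PySem.Dict.ofList ((PySem.List.pyRange 1 (nV+1) 1).map (fun i => (i, ([] : List Int)))))).modify nV []
        (· ++ PySem.List.pyRange 1 (nV-1+1) 1)).items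
      = (PySem.List.pyRange 1 (nV+1) 1).map (fun k => (k, pvTval nV k)) := by
  have hJm : (((nV-1).toNat : Nat) : Int) = nV - 1 := Int.toNat_of_nonneg (by omega)
  rw [show nV - 1 + 1 = 1 + (((nV-1).toNat : Nat) : Int) from by omega]
  have hk0 : (PySem.Dict.ofList ((PySem.List.pyRange 1 (nV+1) 1).map (fun i => (i, ([] : List Int))))).keys
      = PySem.List.pyRange 1 (nV+1) 1 := pv_keys_ofList_map _ _ (PySem.List.nodup_pyRange_one _ _)
  have hmem : ∀ i : Int, 1 ≤ i → i < 1 + (((nV-1).toNat : Nat) : Int) →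
      i ∈ (PySem.Dict.ofList ((PySem.List.pyRange 1 (nV+1) 1).map (fun i => (i, ([] : List Int))))).keys := by
    intro i h1 h2
    rw [hk0]; exact PySem.List.mem_pyRange_one.mpr (by omega)
  refine pv_items_char _ _ _ [] ?_ (PySem.List.nodup_pyRange_one _ _) ?_
  · rw [pv_keys_modify_mem (by
        rw [pvA_t_keys nV (nV-1).toNat _ hmem, hk0]
        exact PySem.List.mem_pyRange_one.mpr (by omega)),
      pvA_t_keys nV (nV-1).toNat _ hmem, hk0]
  · intro k hk
    have hkb := PySem.List.mem_pyRange_one.mp hk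
    rw [PySem.Dict.getD_modify]
    simp only [pvA_t_getD nV ((nV-1).toNat)]
    rw [pv_getD_ofList_map _ _ (PySem.List.nodup_pyRange_one _ _) k hk,
        pv_getD_ofList_map _ _ (PySem.List.nodup_pyRange_one _ _) nV
          (PySem.List.mem_pyRange_one.mpr (by omega))]
    unfold pvTval
    by_cases hknV : k = nV
    · rw [if_pos hknV, if_pos hknV, if_neg (by omega)]
      simp only [List.nil_append, List.append_nil]
      congr 1
      omega
    · rw [if_neg hknV, if_neg hknV, if_pos (by omega)]
      simp

lemma pvA_q_items (nV : Int) (h : 1 ≤ nV) (tD : PySem.Dict Int (List Int))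
    (htD : ∀ k ∈ PySem.List.pyRange 1 (nV+1) 1, tD.getD k [] = pvTval nV k) :
    ((PySem.List.pyRange 1 (nV+1) 1).foldl (fun d i => d.insert i ((tD.getD i []).length : Int))
        (PySem.Dict.ofList ((PySem.List.pyRange 1 (nV+1) 1).map (fun i => (i, (0 : Int)))))).items
      = (PySem.List.pyRange 1 (nV+1) 1).map (fun k => (k, pvQval nV k)) := by
  have hJ1 : ((nV.toNat : Nat) : Int) = nV := Int.toNat_of_nonneg (by omega)
  rw [show nV + 1 = 1 + ((nV.toNat : Nat) : Int) from by omega]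
  have hk0 : (PySem.Dict.ofList ((PySem.List.pyRange 1 (1 + ((nV.toNat : Nat) : Int)) 1).map (fun i => (i, (0 : Int))))).keys
      = PySem.List.pyRange 1 (1 + ((nV.toNat : Nat) : Int)) 1 := pv_keys_ofList_map _ _ (PySem.List.nodup_pyRange_one _ _)
  have hmem : ∀ i : Int, 1 ≤ i → i < 1 + ((nV.toNat : Nat) : Int) →
      i ∈ (PySem.Dict.ofList ((PySem.List.pyRange 1 (1 + ((nV.toNat : Nat) : Int)) 1).map (fun i => (i, (0 : Int))))).keys := by
    intro i h1 h2
    rw [hk0]; exact PySem.List.mem_pyRange_one.mpr (by omega)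
  refine pv_items_char _ _ _ 0 ?_ (PySem.List.nodup_pyRange_one _ _) ?_
  · rw [pvA_q_keys _ nV.toNat _ hmem, hk0]
  · intro k hk
    have hkb := PySem.List.mem_pyRange_one.mp hk
    rw [pvA_q_getD _ nV.toNat _ k, if_pos (by omega), htD k (by rw [show nV + 1 = 1 + ((nV.toNat : Nat) : Int) from by omega]; exact hk)]
    rfl

lemma pvA_vf_items (nV : Int) (h : 1 ≤ nV) :
    (((PySem.List.pyRange 1 (nV-1+1) 1).foldl (fun d i => d.modify i [] (· ++ [i, nV-1+i]))
        (PySem.Dict.ofList ((PySem.List.pyRange 1 (nV+1) 1).map (fun i => (i, ([] : List Int)))))).modify nV []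
        (· ++ (PySem.List.pyRange nV ((nV-1)*2+1) 1 ++ [(nV-1)*2+1]))).items
      = (PySem.List.pyRange 1 (nV+1) 1).map (fun k => (k, pvVfval nV k)) := by
  have hJm : (((nV-1).toNat : Nat) : Int) = nV - 1 := Int.toNat_of_nonneg (by omega)
  rw [show nV - 1 + 1 = 1 + (((nV-1).toNat : Nat) : Int) from by omega]
  have hk0 : (PySem.Dict.ofList ((PySem.List.pyRange 1 (nV+1) 1).map (fun i => (i, ([] : List Int))))).keys
      = PySem.List.pyRange 1 (nV+1) 1 := pv_keys_ofList_map _ _ (PySem.List.nodup_pyRange_one _ _)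
  have hmem : ∀ i : Int, 1 ≤ i → i < 1 + (((nV-1).toNat : Nat) : Int) →
      i ∈ (PySem.Dict.ofList ((PySem.List.pyRange 1 (nV+1) 1).map (fun i => (i, ([] : List Int))))).keys := by
    intro i h1 h2
    rw [hk0]; exact PySem.List.mem_pyRange_one.mpr (by omega)
  refine pv_items_char _ _ _ [] ?_ (PySem.List.nodup_pyRange_one _ _) ?_
  · rw [pv_keys_modify_mem (by
        rw [pvA_vf_keys nV (nV-1).toNat _ hmem, hk0]
        exact PySem.List.mem_pyRange_one.mpr (by omega)),
      pvA_vf_keys nV (nV-1).toNat _ hmem, hk0]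
  · intro k hk
    have hkb := PySem.List.mem_pyRange_one.mp hk
    rw [PySem.Dict.getD_modify]
    simp only [pvA_vf_getD nV ((nV-1).toNat)]
    rw [pv_getD_ofList_map _ _ (PySem.List.nodup_pyRange_one _ _) k hk,
        pv_getD_ofList_map _ _ (PySem.List.nodup_pyRange_one _ _) nV
          (PySem.List.mem_pyRange_one.mpr (by omega))]
    unfold pvVfval
    by_cases hknV : k = nV
    · rw [if_pos hknV, if_pos hknV, if_neg (by omega)]
      simp
    · rw [if_neg hknV, if_neg hknV, if_pos (by omega)]
      simp

lemma pvA_fv_items (nV : Int) (h : 1 ≤ nV) :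
    (((PySem.List.pyRange 1 (nV-1+1) 1).foldl
        (fun d i => (d.modify i [] (· ++ [i])).modify (nV-1+i) [] (· ++ [i, nV]))
        (PySem.Dict.ofList ((PySem.List.pyRange 1 ((nV-1)*2+2) 1).map (fun f => (f, ([] : List Int)))))).modify
        ((nV-1)*2+1) [] (· ++ [nV])).items
      = (PySem.List.pyRange 1 ((nV-1)*2+2) 1).map (fun k => (k, pvFvval nV k)) := by
  have hJm : (((nV-1).toNat : Nat) : Int) = nV - 1 := Int.toNat_of_nonneg (by omega)
  rw [show nV - 1 + 1 = 1 + (((nV-1).toNat : Nat) : Int) from by omega]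
  have hk0 : (PySem.Dict.ofList ((PySem.List.pyRange 1 ((nV-1)*2+2) 1).map (fun f => (f, ([] : List Int))))).keys
      = PySem.List.pyRange 1 ((nV-1)*2+2) 1 := pv_keys_ofList_map _ _ (PySem.List.nodup_pyRange_one _ _)
  have hmem : ∀ i : Int, 1 ≤ i → i < 1 + (((nV-1).toNat : Nat) : Int) →
      i ∈ (PySem.Dict.ofList ((PySem.List.pyRange 1 ((nV-1)*2+2) 1).map (fun f => (f, ([] : List Int))))).keys ∧
      nV-1+i ∈ (PySem.Dict.ofList ((PySem.List.pyRange 1 ((nV-1)*2+2) 1).map (fun f => (f, ([] : List Int))))).keys := by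
    intro i h1 h2
    constructor <;> (rw [hk0]; exact PySem.List.mem_pyRange_one.mpr (by omega))
  refine pv_items_char _ _ _ [] ?_ (PySem.List.nodup_pyRange_one _ _) ?_
  · rw [pv_keys_modify_mem (by
        rw [pvA_fv_keys nV (nV-1).toNat _ hmem, hk0]
        exact PySem.List.mem_pyRange_one.mpr (by omega)),
      pvA_fv_keys nV (nV-1).toNat _ hmem, hk0]
  · intro k hk
    have hkb := PySem.List.mem_pyRange_one.mp hk
    rw [PySem.Dict.getD_modify]
    simp only [pvA_fv_getD nV ((nV-1).toNat) _ (by omega)]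
    rw [pv_getD_ofList_map _ _ (PySem.List.nodup_pyRange_one _ _) k hk,
        pv_getD_ofList_map _ _ (PySem.List.nodup_pyRange_one _ _) ((nV-1)*2+1)
          (PySem.List.mem_pyRange_one.mpr (by omega))]
    unfold pvFvval
    by_cases hk1 : k = (nV-1)*2+1
    · rw [if_pos hk1, if_pos hk1, if_neg (by omega), if_neg (by omega)]
      simp
    · rw [if_neg hk1, if_neg hk1]
      by_cases hk2 : k < nV
      · rw [if_pos hk2, if_pos (by omega), if_neg (by omega)]
        simp
      · rw [if_neg hk2, if_neg (by omega), if_pos (by omega)]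
        simp

-- ===== B-side values =====
lemma pvB_fv_val (nV : Int) (h : 1 ≤ nV) :
    ∀ f : Int, 1 ≤ f → f < (nV-1)*2+2 →
    ((((PySem.List.pyRange 1 (nV-1+1) 1).foldl
          (fun es i => es ++ [(i, i), (i, nV-1+i), (nV, nV-1+i)]) ([] : List (Int × Int)))
        ++ [(nV, 2*(nV-1)+1)]).filter (fun p => p.2 == f)).map (fun p => p.1) = pvFvval nV f := by
  intro f hf1 hf2
  have hJm : (((nV-1).toNat : Nat) : Int) = nV - 1 := Int.toNat_of_nonneg (by omega)
  rw [show nV - 1 + 1 = 1 + (((nV-1).toNat : Nat) : Int) from by omega,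
      List.filter_append, List.map_append,
      pvB_fv_filter nV ((nV-1).toNat) (by omega) f]
  simp only [List.filter_cons, List.filter_nil, beq_iff_eq]
  unfold pvFvval
  by_cases h1 : f = (nV-1)*2+1
  · rw [if_neg (show ¬(1 ≤ f ∧ f < 1 + (((nV-1).toNat : Nat) : Int)) from by omega),
        if_neg (show ¬(nV ≤ f ∧ f < nV + (((nV-1).toNat : Nat) : Int)) from by omega),
        if_pos (show 2*(nV-1)+1 = f from by omega), if_pos h1]
    simp
  · by_cases h2 : f < nV
    · rw [if_pos (show 1 ≤ f ∧ f < 1 + (((nV-1).toNat : Nat) : Int) from by omega),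
          if_neg (show ¬(nV ≤ f ∧ f < nV + (((nV-1).toNat : Nat) : Int)) from by omega),
          if_neg (show ¬(2*(nV-1)+1 = f) from by omega), if_neg h1, if_pos h2]
      simp
    · rw [if_neg (show ¬(1 ≤ f ∧ f < 1 + (((nV-1).toNat : Nat) : Int)) from by omega),
          if_pos (show nV ≤ f ∧ f < nV + (((nV-1).toNat : Nat) : Int) from by omega),
          if_neg (show ¬(2*(nV-1)+1 = f) from by omega), if_neg h1, if_neg h2]
      simp

lemma pvB_vf_val (nV : Int) (h : 1 ≤ nV) :
    ∀ v : Int, 1 ≤ v → v < nV+1 →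
    ((((PySem.List.pyRange 1 (nV-1+1) 1).foldl
          (fun es i => es ++ [(i, i), (i, nV-1+i), (nV, nV-1+i)]) ([] : List (Int × Int)))
        ++ [(nV, 2*(nV-1)+1)]).filter (fun p => p.1 == v)).map (fun p => p.2) = pvVfval nV v := by
  intro v hv1 hv2
  have hJm : (((nV-1).toNat : Nat) : Int) = nV - 1 := Int.toNat_of_nonneg (by omega)
  rw [show nV - 1 + 1 = 1 + (((nV-1).toNat : Nat) : Int) from by omega,
      List.filter_append, List.map_append,
      pvB_vf_filter nV ((nV-1).toNat) (by omega) v]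
  simp only [List.filter_cons, List.filter_nil, beq_iff_eq]
  unfold pvVfval
  by_cases h1 : v = nV
  · rw [if_neg (show ¬(1 ≤ v ∧ v < 1 + (((nV-1).toNat : Nat) : Int)) from by omega),
        if_pos h1, if_pos (show nV = v from h1.symm), if_pos h1]
    have : nV + (((nV-1).toNat : Nat) : Int) = (nV-1)*2+1 := by omega
    rw [this]
    simp
    ring
  · rw [if_pos (show 1 ≤ v ∧ v < 1 + (((nV-1).toNat : Nat) : Int) from by omega),
        if_neg h1, if_neg (show ¬(nV = v) from fun hh => h1 hh.symm), if_neg h1]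
    simp

-- ===== B-side items =====
lemma pv_keys_foldl_modify_fst (l : List (Int × Int)) (d : PySem.Dict Int (List Int))
    (h : ∀ p ∈ l, p.1 ∈ d.keys) :
    (l.foldl (fun d p => d.modify p.1 [] (· ++ [p.2])) d).keys = d.keys := by
  induction l generalizing d with
  | nil => rfl
  | cons p l ih =>
    rw [List.foldl_cons,
        ih _ (fun q hq => by
          rw [pv_keys_modify_mem (h p (List.mem_cons_self ..))]
          exact h q (List.mem_cons_of_mem _ hq)),
        pv_keys_modify_mem (h p (List.mem_cons_self ..))]

lemma pv_edges_mem (nV : Int) (h : 1 ≤ nV) :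
    ∀ p ∈ (((PySem.List.pyRange 1 (nV-1+1) 1).foldl
          (fun es i => es ++ [(i, i), (i, nV-1+i), (nV, nV-1+i)]) ([] : List (Int × Int)))
        ++ [(nV, 2*(nV-1)+1)]),
      (1 ≤ p.1 ∧ p.1 ≤ nV) ∧ (1 ≤ p.2 ∧ p.2 ≤ (nV-1)*2+1) := by
  intro p hp
  rw [PySem.List.foldl_append_eq_flatMap, List.nil_append] at hp
  rcases List.mem_append.mp hp with hp' | hp'
  · rcases List.mem_flatMap.mp hp' with ⟨i, hi, hpi⟩
    have hib := PySem.List.mem_pyRange_one.mp hi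
    simp only [List.mem_cons, List.not_mem_nil, or_false] at hpi
    rcases hpi with rfl | rfl | rfl <;> exact ⟨⟨by omega, by omega⟩, by omega, by omega⟩
  · simp only [List.mem_singleton] at hp'
    subst hp'
    exact ⟨⟨by omega, by omega⟩, by omega, by omega⟩

lemma pvB_vf_items (nV : Int) (h : 1 ≤ nV) :
    ((((PySem.List.pyRange 1 (nV-1+1) 1).foldl
          (fun es i => es ++ [(i, i), (i, nV-1+i), (nV, nV-1+i)]) ([] : List (Int × Int)))
        ++ [(nV, 2*(nV-1)+1)]).foldl (fun d p => d.modify p.1 [] (· ++ [p.2]))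
        (PySem.Dict.ofList ((PySem.List.pyRange 1 (nV+1) 1).map (fun v => (v, ([] : List Int)))))).items
      = (PySem.List.pyRange 1 (nV+1) 1).map (fun k => (k, pvVfval nV k)) := by
  refine pv_items_char _ _ _ [] ?_ (PySem.List.nodup_pyRange_one _ _) ?_
  · rw [pv_keys_foldl_modify_fst _ _ (fun p hp => by
          rw [pv_keys_ofList_map _ _ (PySem.List.nodup_pyRange_one _ _)]
          exact PySem.List.mem_pyRange_one.mpr (by have := pv_edges_mem nV h p hp; omega)),
        pv_keys_ofList_map _ _ (PySem.List.nodup_pyRange_one _ _)]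
  · intro k hk
    have hkb := PySem.List.mem_pyRange_one.mp hk
    rw [PySem.Dict.getD_foldl_modify_append,
        pv_getD_ofList_map _ _ (PySem.List.nodup_pyRange_one _ _) k hk, List.nil_append]
    exact pvB_vf_val nV h k (by omega) (by omega)

lemma pvB_fv_items (nV : Int) (h : 1 ≤ nV) :
    ((((PySem.List.pyRange 1 (nV-1+1) 1).foldl
          (fun es i => es ++ [(i, i), (i, nV-1+i), (nV, nV-1+i)]) ([] : List (Int × Int)))
        ++ [(nV, 2*(nV-1)+1)]).foldl (fun d p => d.modify p.2 [] (· ++ [p.1]))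
        (PySem.Dict.ofList ((PySem.List.pyRange 1 (2*(nV-1)+2) 1).map (fun f => (f, ([] : List Int)))))).items
      = (PySem.List.pyRange 1 ((nV-1)*2+2) 1).map (fun k => (k, pvFvval nV k)) := by
  rw [show ((((PySem.List.pyRange 1 (nV-1+1) 1).foldl
          (fun es i => es ++ [(i, i), (i, nV-1+i), (nV, nV-1+i)]) ([] : List (Int × Int)))
        ++ [(nV, 2*(nV-1)+1)]).foldl (fun d p => d.modify p.2 [] (· ++ [p.1]))
        (PySem.Dict.ofList ((PySem.List.pyRange 1 (2*(nV-1)+2) 1).map (fun f => (f, ([] : List Int))))))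
      = (((((PySem.List.pyRange 1 (nV-1+1) 1).foldl
          (fun es i => es ++ [(i, i), (i, nV-1+i), (nV, nV-1+i)]) ([] : List (Int × Int)))
        ++ [(nV, 2*(nV-1)+1)]).map Prod.swap).foldl (fun d p => d.modify p.1 [] (· ++ [p.2]))
        (PySem.Dict.ofList ((PySem.List.pyRange 1 (2*(nV-1)+2) 1).map (fun f => (f, ([] : List Int))))))
      from (List.foldl_map (f := (Prod.swap : Int × Int → Int × Int))
          (g := fun (d : PySem.Dict Int (List Int)) p => d.modify p.1 [] (· ++ [p.2]))).symm]
  refine pv_items_char _ _ _ [] ?_ (PySem.List.nodup_pyRange_one _ _) ?_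
  · rw [pv_keys_foldl_modify_fst _ _ (fun p hp => by
          rw [pv_keys_ofList_map _ _ (PySem.List.nodup_pyRange_one _ _)]
          rcases List.mem_map.mp hp with ⟨q, hq, rfl⟩
          exact PySem.List.mem_pyRange_one.mpr (by
            have := pv_edges_mem nV h q hq
            simp only [Prod.fst_swap]
            omega)),
        pv_keys_ofList_map _ _ (PySem.List.nodup_pyRange_one _ _)]
    congr 1
    ring
  · intro k hk
    have hkb := PySem.List.mem_pyRange_one.mp hk
    rw [PySem.Dict.getD_foldl_modify_append,
        pv_getD_ofList_map _ _ (PySem.List.nodup_pyRange_one _ _) k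
          (PySem.List.mem_pyRange_one.mpr (by omega)), List.nil_append,
        List.filter_map, List.map_map]
    have : ((fun p => p.1 == k) ∘ (Prod.swap : Int × Int → Int × Int)) = (fun p => p.2 == k) := rfl
    rw [this]
    have : ((fun (x : Int × Int) => x.2) ∘ (Prod.swap : Int × Int → Int × Int)) = (fun p => p.1) := rfl
    rw [this]
    exact pvB_fv_val nV h k (by omega) (by omega)

lemma pvB_t_items (nV : Int) (h : 1 ≤ nV) (vfD fvD : PySem.Dict Int (List Int))
    (hvf : vfD.items = (PySem.List.pyRange 1 (nV+1) 1).map (fun k => (k, pvVfval nV k)))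
    (hfv : fvD.items = (PySem.List.pyRange 1 ((nV-1)*2+2) 1).map (fun k => (k, pvFvval nV k))) :
    (PySem.Dict.ofList ((PySem.List.pyRange 1 (nV+1) 1).map
      (fun v => (v, (vfD.getD v []).flatMap (fun g => (fvD.getD g []).filter (fun u => u != v)))))).items
      = (PySem.List.pyRange 1 (nV+1) 1).map (fun k => (k, pvTval nV k)) := by
  refine pv_items_char _ _ _ [] ?_ (PySem.List.nodup_pyRange_one _ _) ?_
  · exact pv_keys_ofList_map _ _ (PySem.List.nodup_pyRange_one _ _)
  · intro v hv
    have hvb := PySem.List.mem_pyRange_one.mp hv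
    rw [pv_getD_ofList_map _ _ (PySem.List.nodup_pyRange_one _ _) v hv,
        pv_getD_of_items hvf (PySem.List.nodup_pyRange_one _ _) hv []]
    have hcong : ∀ g ∈ pvVfval nV v,
        (fvD.getD g []).filter (fun u => u != v) = (pvFvval nV g).filter (fun u => u != v) := by
      intro g hg
      have hgmem : g ∈ PySem.List.pyRange 1 ((nV-1)*2+2) 1 := by
        unfold pvVfval at hg
        by_cases hveq : v = nV
        · rw [if_pos hveq] at hg
          rcases List.mem_append.mp hg with hg' | hg'
          · exact PySem.List.mem_pyRange_one.mpr
              (by have := PySem.List.mem_pyRange_one.mp hg'; omega)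
          · simp only [List.mem_singleton] at hg'
            exact PySem.List.mem_pyRange_one.mpr (by omega)
        · rw [if_neg hveq] at hg
          simp only [List.mem_cons, List.not_mem_nil, or_false] at hg
          rcases hg with hg' | hg' <;> exact PySem.List.mem_pyRange_one.mpr (by omega)
      rw [pv_getD_of_items hfv (PySem.List.nodup_pyRange_one _ _) hgmem []]
    rw [List.flatMap_congr hcong]
    unfold pvTval
    by_cases hveq : v = nV
    · rw [if_pos hveq]
      unfold pvVfval
      rw [if_pos hveq, List.flatMap_append]
      have htail : ([(nV-1)*2+1] : List Int).flatMap
          (fun g => (pvFvval nV g).filter (fun u => u != v)) = [] := by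
        simp only [List.flatMap_cons, List.flatMap_nil, List.append_nil]
        unfold pvFvval
        rw [if_pos rfl]
        simp [hveq]
      rw [htail, List.append_nil]
      have hmain : ∀ g ∈ PySem.List.pyRange nV ((nV-1)*2+1) 1,
          (pvFvval nV g).filter (fun u => u != v) = [g-(nV-1)] := by
        intro g hg
        have hgb := PySem.List.mem_pyRange_one.mp hg
        unfold pvFvval
        rw [if_neg (by omega), if_neg (by omega)]
        have hne : ((g-(nV-1)) != nV) = true := by
          simp only [bne_iff_ne, ne_eq]
          omega
        simp [hveq, hne]
      rw [List.flatMap_congr hmain, ← List.map_eq_flatMap,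
          PySem.List.pyRange_one, PySem.List.pyRange_one, List.map_map]
      have : ((nV-1)*2+1 - nV).toNat = (nV-1+1-1).toNat := by omega
      rw [this]
      refine List.map_congr_left ?_
      intro a _
      simp only [Function.comp_apply]
      omega
    · rw [if_neg hveq]
      unfold pvVfval
      rw [if_neg hveq]
      simp only [List.flatMap_cons, List.flatMap_nil, List.append_nil]
      have e1 : (pvFvval nV v).filter (fun u => u != v) = [] := by
        unfold pvFvval
        rw [if_neg (by omega), if_pos (by omega)]
        simp
      have e2 : (pvFvval nV (nV-1+v)).filter (fun u => u != v) = [nV] := by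
        unfold pvFvval
        rw [if_neg (by omega), if_neg (by omega)]
        have hv1 : ((nV-1+v - (nV-1)) != v) = false := by
          simp only [bne_eq_false_iff_eq]
          omega
        have hv2 : (nV != v) = true := by
          simp only [bne_iff_ne, ne_eq]
          omega
        simp [hv2]
      rw [e1, e2]
      simp

lemma pvB_q_items (nV : Int) (tD : PySem.Dict Int (List Int))
    (htD : tD.items = (PySem.List.pyRange 1 (nV+1) 1).map (fun k => (k, pvTval nV k))) :
    (PySem.Dict.ofList ((PySem.List.pyRange 1 (nV+1) 1).map
      (fun v => (v, ((tD.getD v []).length : Int))))).items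
      = (PySem.List.pyRange 1 (nV+1) 1).map (fun k => (k, pvQval nV k)) := by
  refine pv_items_char _ _ _ 0 ?_ (PySem.List.nodup_pyRange_one _ _) ?_
  · exact pv_keys_ofList_map _ _ (PySem.List.nodup_pyRange_one _ _)
  · intro k hk
    rw [pv_getD_ofList_map _ _ (PySem.List.nodup_pyRange_one _ _) k hk,
        pv_getD_of_items htD (PySem.List.nodup_pyRange_one _ _) hk []]
    rfl

lemma pv_main (nV : Int) (h : 1 ≤ nV) : generate_graph_weights nV = generate_graph_weights_alt nV := by
  dsimp only [generate_graph_weights, generate_graph_weights_alt]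
  rw [PySem.List.foldl_prod_mk
        (f := fun (d : PySem.Dict Int (List Int)) (i : Int) => d.modify i [] (· ++ [nV]))
        (g := fun (p : PySem.Dict Int (List Int) × PySem.Dict Int (List Int)) (i : Int) =>
          ((p.1.modify i [] (· ++ [i])).modify (nV-1+i) [] (· ++ [i, nV]),
           p.2.modify i [] (· ++ [i, nV-1+i]))),
      PySem.List.foldl_prod_mk
        (f := fun (d : PySem.Dict Int (List Int)) (i : Int) =>
          (d.modify i [] (· ++ [i])).modify (nV-1+i) [] (· ++ [i, nV]))
        (g := fun (d : PySem.Dict Int (List Int)) (i : Int) => d.modify i [] (· ++ [i, nV-1+i])),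
      PySem.List.foldl_prod_mk
        (f := fun (d : PySem.Dict Int (List Int)) (p : Int × Int) => d.modify p.1 [] (· ++ [p.2]))
        (g := fun (d : PySem.Dict Int (List Int)) (p : Int × Int) => d.modify p.2 [] (· ++ [p.1]))]
  dsimp only
  simp only [Prod.mk.injEq]
  refine ⟨trivial, ?_, ?_, ?_, ?_, ?_⟩
  · -- Nf = number of factors
    show _ = (2*(nV-1)+1 : Int)
    have hJm : (((nV-1).toNat : Nat) : Int) = nV - 1 := Int.toNat_of_nonneg (by omega)
    rw [show nV - 1 + 1 = 1 + (((nV-1).toNat : Nat) : Int) from by omega]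
    have hall : ∀ i : Int, 1 ≤ i → i < 1 + (((nV-1).toNat : Nat) : Int) →
        i ∈ (PySem.Dict.ofList ((PySem.List.pyRange 1 ((nV-1)*2+2) 1).map (fun f => (f, ([] : List Int))))).keys ∧
        nV - 1 + i ∈ (PySem.Dict.ofList ((PySem.List.pyRange 1 ((nV-1)*2+2) 1).map (fun f => (f, ([] : List Int))))).keys := by
      intro i h1 h2
      rw [hJm] at h2
      constructor <;>
        (rw [pv_keys_ofList_map _ _ (PySem.List.nodup_pyRange_one _ _)];
         exact PySem.List.mem_pyRange_one.mpr (by omega))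
    rw [pv_keys_modify_mem (by
          rw [pvA_fv_keys nV (nV-1).toNat _ hall,
              pv_keys_ofList_map _ _ (PySem.List.nodup_pyRange_one _ _)]
          exact PySem.List.mem_pyRange_one.mpr (by omega)),
        pvA_fv_keys nV (nV-1).toNat _ hall,
        pv_keys_ofList_map _ _ (PySem.List.nodup_pyRange_one _ _),
        PySem.List.length_pyRange_one]
    omega
  · -- t
    rw [pvA_t_items nV h,
        pvB_t_items nV h _ _ (pvB_vf_items nV h) (pvB_fv_items nV h)]
  · -- q
    rw [pvA_q_items nV h _
          (fun k hk => pv_getD_of_items (pvA_t_items nV h) (PySem.List.nodup_pyRange_one _ _) hk []),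
        pvB_q_items nV _ (pvB_t_items nV h _ _ (pvB_vf_items nV h) (pvB_fv_items nV h))]
  · -- vf
    rw [pvA_vf_items nV h, pvB_vf_items nV h]
  · -- fv
    rw [pvA_fv_items nV h, pvB_fv_items nV h]

-- ===== VERDICT (by name: the statement is the Claim_ definition above) =====
theorem generate_graph_weights_spec : Claim_equal_generate_graph_weights := by
  intro nV _ hpre
  unfold Spec_generate_graph_weights
  exact pv_main nV hpre
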